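-- pv_equiv track=rewrite | github.com/aegis-dq/aegis-dq | aegis/core/lineage/openlineage.py | upstream_chain
-- ===== SOURCE A (Python) =====
-- LineageGraph = dict[str, list[str]]
--
-- def upstream_chain(table: str, graph: LineageGraph, depth: int = 3) -> list[str]:
--     """Walk upstream from `table` up to `depth` hops, returning unique ancestors."""
--     visited: list[str] = []
--     frontier = [table]
--     for _ in range(depth):
--         next_frontier: list[str] = []
--         for node in frontier:
--             for parent in graph.get(node, []):
--                 if parent not in visited and parent != table:
--                     visited.append(parent)
--                     next_frontier.append(parent)
--         frontier = next_frontier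
--         if not frontier:
--             break
--     return visited
-- ===== SOURCE B (Python) =====
-- def upstream_chain(table: str, graph: dict, depth: int = 3) -> list[str]:
--     """Recursive, staged decomposition: each level is produced as a whole by a
--     flatten-then-filter pipeline, and the answer is the concatenation of levels
--     returned by recursion on the remaining hop budget (no shared mutable
--     visited/frontier lists)."""
--
--     def dedup_new(cands: list[str], banned: set) -> list[str]:
--         seen = set(banned)
--         out: list[str] = []
--         for p in cands:
--             if p not in seen:
--                 seen.add(p)
--                 out.append(p)
--         return out
--
--     def go(frontier: list[str], banned: set, k: int) -> list[str]:
--         if k <= 0 or not frontier: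
--             return []
--         cands = [p for n in frontier for p in graph.get(n, [])]
--         fresh = dedup_new(cands, banned)
--         return fresh + go(fresh, banned | set(fresh), k - 1)
--
--     return go([table], {table}, depth)
-- ===== Notes on version B (the rewrite author's own statement) =====
-- stated objective: alternative
-- what changed: Replaces A's iterative level-synchronized loop that mutates shared visited/next_frontier lists with inline membership tests by a recursion on the remaining hop budget in which each level is produced as a whole by a staged flatten-then-dedup pipeline against a banned set, and the result is the concatenation of the levels.
import Mathlib
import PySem

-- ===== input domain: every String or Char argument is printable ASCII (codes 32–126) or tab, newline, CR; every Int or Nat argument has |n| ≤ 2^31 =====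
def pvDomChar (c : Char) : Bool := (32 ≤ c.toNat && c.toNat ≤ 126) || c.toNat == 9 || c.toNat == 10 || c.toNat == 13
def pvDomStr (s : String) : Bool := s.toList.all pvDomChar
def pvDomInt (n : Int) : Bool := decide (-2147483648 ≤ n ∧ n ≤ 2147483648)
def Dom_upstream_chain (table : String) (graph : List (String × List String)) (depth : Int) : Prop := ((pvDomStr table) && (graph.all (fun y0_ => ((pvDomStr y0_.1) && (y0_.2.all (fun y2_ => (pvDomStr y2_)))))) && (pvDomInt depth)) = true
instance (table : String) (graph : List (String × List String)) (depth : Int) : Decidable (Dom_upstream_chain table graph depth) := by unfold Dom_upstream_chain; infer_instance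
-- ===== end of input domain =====

-- B replaces A's iterative level-synchronized BFS (shared mutable visited/next_frontier lists
-- with inline membership tests) by a recursive staged decomposition: each level is produced as
-- a whole by a flatten-then-filter pipeline and the answer is the concatenation of levels.

-- shared transliteration of Python's graph.get(node, []) (dict lookup with default)
def pvParents (graph : List (String × List String)) (node : String) : List String :=
  PySem.Dict.getD ⟨graph⟩ node []

-- ===== PORT A =====
-- inner 'for parent in graph.get(node, [])'
def pvInnerA (table : String) (visited next : List String) : List String → List String × List String
  | [] => (visited, next)
  | p :: ps =>
      if p ∉ visited ∧ p ≠ table then pvInnerA table (visited ++ [p]) (next ++ [p]) ps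
      else pvInnerA table visited next ps

-- middle 'for node in frontier'
def pvLevelA (table : String) (graph : List (String × List String)) (visited next : List String) :
    List String → List String × List String
  | [] => (visited, next)
  | node :: rest =>
      let s := pvInnerA table visited next (pvParents graph node)
      pvLevelA table graph s.1 s.2 rest

-- outer 'for _ in range(depth)' with the 'if not frontier: break'
def pvLoopA (table : String) (graph : List (String × List String)) :
    Nat → List String → List String → List String
  | 0, visited, _ => visited
  | n + 1, visited, frontier =>
      let s := pvLevelA table graph visited [] frontier
      if s.2 = [] then s.1 else pvLoopA table graph n s.1 s.2

def upstream_chain (table : String) (graph : List (String × List String)) (depth : Int) : List String :=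
  pvLoopA table graph depth.toNat [] [table]

-- ===== PORT B =====
-- 'dedup_new(cands, banned)': filter the staged candidate list, keeping first occurrences
def pvDedupNew : List String → PySem.Set String → List String → List String
  | [], _, out => out
  | p :: ps, seen, out =>
      if PySem.Set.contains seen p then pvDedupNew ps seen out
      else pvDedupNew ps (PySem.Set.add seen p) (out ++ [p])

-- 'go(frontier, banned, k)': recursion on the remaining hop budget k
def pvGo (graph : List (String × List String)) : Nat → List String → PySem.Set String → List String
  | 0, _, _ => []
  | k + 1, frontier, banned =>
      if frontier = [] then []
      else
        let cands := frontier.flatMap (fun n => pvParents graph n)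
        let fresh := pvDedupNew cands banned []
        fresh ++ pvGo graph k fresh (PySem.Set.union banned fresh)

def upstream_chain_alt (table : String) (graph : List (String × List String)) (depth : Int) : List String :=
  pvGo graph depth.toNat [table] (PySem.Set.ofList [table])

-- ===== PRECONDITION & SPEC =====
def Spec_upstream_chain (table : String) (graph : List (String × List String)) (depth : Int) (out : List String) : Prop := out = upstream_chain_alt table graph depth
instance (table : String) (graph : List (String × List String)) (depth : Int) (out : List String) : Decidable (Spec_upstream_chain table graph depth out) := by unfold Spec_upstream_chain; infer_instance

-- ===== CLAIM (what is proved, stated in full; the proofs are below) =====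
def Claim_equal_upstream_chain : Prop := ∀ (table : String) (graph : List (String × List String)) (depth : Int), Dom_upstream_chain table graph depth → Spec_upstream_chain table graph depth (upstream_chain table graph depth)

-- ===== LEMMAS AND PROOFS =====

-- B's banned set holds exactly {table} ∪ A's visited
def pvInv (table : String) (seen : PySem.Set String) (visited : List String) : Prop :=
  ∀ x, x ∈ seen ↔ (x = table ∨ x ∈ visited)

-- proof-only state-passing version of pvDedupNew (also returns the final local seen-set)
def pvDedupSt : List String → PySem.Set String → List String → PySem.Set String × List String
  | [], seen, out => (seen, out)
  | p :: ps, seen, out =>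
      if PySem.Set.contains seen p then pvDedupSt ps seen out
      else pvDedupSt ps (PySem.Set.add seen p) (out ++ [p])

theorem pvDedupNew_eq (ps : List String) : ∀ seen out,
    pvDedupNew ps seen out = (pvDedupSt ps seen out).2 := by
  induction ps with
  | nil => intro seen out; rfl
  | cons p ps ih =>
      intro seen out
      simp only [pvDedupNew, pvDedupSt]
      split <;> simp [ih]

theorem pvDedupSt_append (ps qs : List String) : ∀ seen out,
    pvDedupSt (ps ++ qs) seen out =
      pvDedupSt qs (pvDedupSt ps seen out).1 (pvDedupSt ps seen out).2 := by
  induction ps with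
  | nil => intro seen out; rfl
  | cons p ps ih =>
      intro seen out
      simp only [pvDedupSt, List.cons_append]
      split <;> simp [ih]

theorem pvInnerCorr (table : String) (ps : List String) :
    ∀ (seen : PySem.Set String) (visited next out : List String),
    pvInv table seen visited →
    ∃ Δ seen',
      pvInnerA table visited next ps = (visited ++ Δ, next ++ Δ) ∧
      pvDedupSt ps seen out = (seen', out ++ Δ) ∧
      pvInv table seen' (visited ++ Δ) := by
  induction ps with
  | nil =>
      intro seen visited next out hInv
      exact ⟨[], seen, by simp [pvInnerA], by simp [pvDedupSt], by simpa using hInv⟩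
  | cons p ps ih =>
      intro seen visited next out hInv
      by_cases h : p ∈ seen
      · have hA : ¬ (p ∉ visited ∧ p ≠ table) := by
          have := (hInv p).1 h; tauto
        obtain ⟨Δ, seen', h1, h2, h3⟩ := ih seen visited next out hInv
        exact ⟨Δ, seen', by simpa [pvInnerA, hA] using h1, by simpa [pvDedupSt, h] using h2, h3⟩
      · have hA : p ∉ visited ∧ p ≠ table := by
          constructor
          · intro hx; exact h ((hInv p).2 (Or.inr hx))
          · intro hx; exact h ((hInv p).2 (Or.inl hx))
        have hInv' : pvInv table (PySem.Set.add seen p) (visited ++ [p]) := by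
          intro x
          rw [PySem.Set.mem_add]
          constructor
          · rintro (hx | rfl)
            · rcases (hInv x).1 hx with h1 | h1
              · exact Or.inl h1
              · exact Or.inr (by simp [h1])
            · exact Or.inr (by simp)
          · rintro (rfl | hx)
            · exact Or.inl ((hInv x).2 (Or.inl rfl))
            · rcases List.mem_append.1 hx with h1 | h1
              · exact Or.inl ((hInv x).2 (Or.inr h1))
              · simp at h1; exact Or.inr h1
        obtain ⟨Δ, seen', h1, h2, h3⟩ :=
          ih (PySem.Set.add seen p) (visited ++ [p]) (next ++ [p]) (out ++ [p]) hInv'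
        refine ⟨p :: Δ, seen', ?_, ?_, ?_⟩
        · simp only [pvInnerA, if_pos hA]; rw [h1]; simp
        · simp only [pvDedupSt]
          rw [if_neg (by simpa using h), h2]; simp
        · simpa using h3
theorem pvLevelCorr (table : String) (graph : List (String × List String)) (frontier : List String) :
    ∀ (seen : PySem.Set String) (visited next out : List String),
    pvInv table seen visited →
    ∃ Δ seen',
      pvLevelA table graph visited next frontier = (visited ++ Δ, next ++ Δ) ∧
      pvDedupSt (frontier.flatMap (fun n => pvParents graph n)) seen out = (seen', out ++ Δ) ∧
      pvInv table seen' (visited ++ Δ) := by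
  induction frontier with
  | nil =>
      intro seen visited next out hInv
      exact ⟨[], seen, by simp [pvLevelA], by simp [pvDedupSt], by simpa using hInv⟩
  | cons node rest ih =>
      intro seen visited next out hInv
      obtain ⟨Δ₁, seen₁, h1, h2, h3⟩ := pvInnerCorr table (pvParents graph node) seen visited next out hInv
      obtain ⟨Δ₂, seen₂, g1, g2, g3⟩ := ih seen₁ (visited ++ Δ₁) (next ++ Δ₁) (out ++ Δ₁) h3
      refine ⟨Δ₁ ++ Δ₂, seen₂, ?_, ?_, ?_⟩
      · simp only [pvLevelA, h1]; rw [g1]; simp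
      · rw [List.flatMap_cons, pvDedupSt_append, h2]; rw [g2]; simp
      · simpa using g3

theorem pvGo_nil (graph : List (String × List String)) (n : Nat) (banned : PySem.Set String) :
    pvGo graph n [] banned = [] := by
  cases n <;> simp [pvGo]

theorem pvUnionInv (table : String) (banned : PySem.Set String) (visited Δ : List String)
    (hInv : pvInv table banned visited) :
    pvInv table (PySem.Set.union banned Δ) (visited ++ Δ) := by
  intro x
  rw [PySem.Set.mem_union, List.mem_append]
  constructor
  · rintro (hx | hx)
    · rcases (hInv x).1 hx with h1 | h1
      · exact Or.inl h1
      · exact Or.inr (Or.inl h1)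
    · exact Or.inr (Or.inr hx)
  · rintro (rfl | hx | hx)
    · exact Or.inl ((hInv x).2 (Or.inl rfl))
    · exact Or.inl ((hInv x).2 (Or.inr hx))
    · exact Or.inr hx

theorem pvMain (table : String) (graph : List (String × List String)) (n : Nat) :
    ∀ (visited frontier : List String) (banned : PySem.Set String),
    pvInv table banned visited → frontier ≠ [] →
    pvLoopA table graph n visited frontier = visited ++ pvGo graph n frontier banned := by
  induction n with
  | zero => intro visited frontier banned _ _; simp [pvLoopA, pvGo]
  | succ n ih =>
      intro visited frontier banned hInv hne
      obtain ⟨Δ, seen', h1, h2, h3⟩ := pvLevelCorr table graph frontier banned visited [] [] hInv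
      have hfresh : pvDedupNew (frontier.flatMap (fun n => pvParents graph n)) banned [] = Δ := by
        rw [pvDedupNew_eq, h2]; simp
      rw [pvLoopA, pvGo]
      simp only [if_neg hne, h1, hfresh]
      by_cases hΔ : Δ = []
      · subst hΔ; simp [pvGo_nil]
      · simp only [List.nil_append, if_neg hΔ]
        rw [ih (visited ++ Δ) Δ (PySem.Set.union banned Δ) (pvUnionInv table banned visited Δ hInv) hΔ]
        simp

-- ===== VERDICT (by name: the statement is the Claim_ definition above) =====
theorem upstream_chain_spec : Claim_equal_upstream_chain := by
  intro table graph depth _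
  unfold Spec_upstream_chain upstream_chain upstream_chain_alt
  rw [pvMain table graph depth.toNat [] [table] (PySem.Set.ofList [table])]
  · simp
  · intro x; simp [PySem.Set.ofList, PySem.Set.add, PySem.Set.empty]
  · simp
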